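-- pv_equiv track=rewrite | github.com/isaacfreeth-ctrl/Croesus | app.py | get_search_terms
-- ===== SOURCE A (Python) =====
-- def parse_boolean_query(query: str) -> dict:
--     """
--     Parse a Boolean search query into components.
--     Supports: OR, NOT operators (case-insensitive)
--     Returns dict with 'type' and 'terms' or nested structure.
--
--     Examples:
--         "Google" -> single term search
--         "Google OR Microsoft" -> any term matches
--         "NOT Google" -> exclude Google
--     """
--     query = query.strip()
--
--     # Check for operators (case-insensitive)
--     query_upper = query.upper()
--
--     # Handle NOT at the start
--     if query_upper.startswith('NOT '):
--         return {
--             'type': 'NOT',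
--             'term': query[4:].strip()
--         }
--
--     # Split by OR
--     if ' OR ' in query_upper:
--         parts = []
--         current = ""
--         i = 0
--         while i < len(query):
--             if query_upper[i:i+4] == ' OR ':
--                 if current.strip():
--                     parts.append(current.strip())
--                 current = ""
--                 i += 4
--             else:
--                 current += query[i]
--                 i += 1
--         if current.strip():
--             parts.append(current.strip())
--
--         if len(parts) > 1:
--             return {
--                 'type': 'OR',
--                 'terms': [parse_boolean_query(p) for p in parts]
--             }
--
--     # Simple term
--     return {
--         'type': 'TERM',
--         'term': query
--     }
--
-- def get_search_terms(query: str) -> list: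
--     """Extract individual search terms from a Boolean query for API calls."""
--     parsed = parse_boolean_query(query)
--     terms = []
--
--     def extract_terms(q):
--         if q['type'] == 'TERM':
--             terms.append(q['term'])
--         elif q['type'] == 'OR':
--             for sub in q['terms']:
--                 extract_terms(sub)
--         elif q['type'] == 'NOT':
--             terms.append(q['term'])
--
--     extract_terms(parsed)
--     return terms
-- ===== SOURCE B (Python) =====
-- def get_search_terms(query):
--     """Extract individual search terms from a Boolean query for API calls."""
--     query = query.strip()
--     upper = query.upper()
--     if upper.startswith('NOT '):
--         return [query[4:].strip()]
--     parts = _or_parts(query, upper)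
--     if len(parts) > 1:
--         return [term for p in parts for term in get_search_terms(p)]
--     return [query]
--
-- def _or_parts(query, upper):
--     i = upper.find(' OR ')
--     if i == -1:
--         head = query.strip()
--         return [head] if head else []
--     head = query[:i].strip()
--     rest = _or_parts(query[i + 4:], upper[i + 4:])
--     return ([head] if head else []) + rest
-- ===== Notes on version B (the rewrite author's own statement) =====
-- stated objective: simpler
-- what changed: B fuses parse_boolean_query's dict AST and the extract_terms walker into one self-recursive function that splits on the first case-insensitive ' OR ' with str.find and slicing, instead of A's char-by-char accumulator loop plus AST build plus tree walk.
import Mathlib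
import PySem

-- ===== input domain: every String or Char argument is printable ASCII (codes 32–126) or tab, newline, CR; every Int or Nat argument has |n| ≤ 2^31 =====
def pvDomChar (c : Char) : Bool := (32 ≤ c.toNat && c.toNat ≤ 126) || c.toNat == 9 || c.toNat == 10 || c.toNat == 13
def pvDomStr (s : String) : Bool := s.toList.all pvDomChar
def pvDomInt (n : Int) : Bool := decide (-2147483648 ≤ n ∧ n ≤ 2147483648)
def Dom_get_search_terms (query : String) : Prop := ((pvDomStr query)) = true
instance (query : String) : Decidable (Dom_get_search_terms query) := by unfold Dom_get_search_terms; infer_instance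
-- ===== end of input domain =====

-- B fuses A's dict-AST builder (parse_boolean_query) and its extract_terms walker into one
-- recursion that splits on the first case-insensitive ' OR ' via str.find/slicing instead of
-- A's char-by-char accumulator loop; objective: simpler.

-- ===== PORT A =====
-- shared literals ' OR ' and 'NOT ' (helpers)
def pvSep : List Char := " OR ".toList
def pvNot4 : List Char := "NOT ".toList

-- A's inner while loop: scan query (qrem) and query_upper (urem) in step, building `current`
-- char by char and appending stripped non-empty pieces to `parts`.
def pvScanA : List Char → List Char → List Char → List (List Char) → List (List Char)
  | [], _, current, parts =>
      if PySem.Chars.strip current ≠ [] then parts ++ [PySem.Chars.strip current] else parts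
  | c :: qs, us, current, parts =>
      if us.take 4 = pvSep then
        pvScanA ((c :: qs).drop 4) (us.drop 4) []
          (if PySem.Chars.strip current ≠ [] then parts ++ [PySem.Chars.strip current] else parts)
      else
        pvScanA qs (us.drop 1) (current ++ [c]) parts
  termination_by q _ _ _ => q.length
  decreasing_by
    all_goals simp [List.length_drop]

-- proof-only helper used by the termination lemmas of both ports: the raw chunks of q between
-- consecutive case-insensitive occurrences of ' OR '
def pvPieces : List Char → List (List Char)
  | [] => [[]]
  | c :: cs =>
      if ((c :: cs).map PySem.Chars.upperChar).take 4 = pvSep then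
        [] :: pvPieces ((c :: cs).drop 4)
      else
        (pvPieces cs).modifyHead (c :: ·)
  termination_by q => q.length
  decreasing_by
    all_goals simp [List.length_drop]

-- stripped non-empty chunks: the part list both ports compute
def pvGood (q : List Char) : List (List Char) :=
  ((pvPieces q).map PySem.Chars.strip).filter (fun p => p ≠ [])

theorem pvPieces_ne_nil (q : List Char) : pvPieces q ≠ [] := by
  induction q using pvPieces.induct with
  | case1 => rw [pvPieces.eq_1]; simp
  | case2 c cs h ih => rw [pvPieces.eq_2, if_pos h]; simp
  | case3 c cs h ih =>
      rw [pvPieces.eq_2, if_neg h]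
      cases hp : pvPieces cs with
      | nil => exact absurd hp ih
      | cons hd tl => simp

theorem pvStrip_length_le (q : List Char) : (PySem.Chars.strip q).length ≤ q.length := by
  simp only [PySem.Chars.strip, PySem.Chars.rstrip, PySem.Chars.lstrip]
  have h1 := List.length_dropWhile_le PySem.Chars.isspace q
  have h2 := List.length_dropWhile_le PySem.Chars.isspace
    (List.dropWhile PySem.Chars.isspace q).reverse
  simp at h2 ⊢
  omega

theorem pvScanA_nil (current : List Char) (parts : List (List Char)) (u : List Char) :
    pvScanA [] u current parts
      = parts ++ (((pvPieces []).modifyHead (current ++ ·)).map PySem.Chars.strip).filter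
          (fun p => p ≠ []) := by
  rw [pvScanA.eq_1, pvPieces.eq_1]
  by_cases h : PySem.Chars.strip current = [] <;> simp [h, List.filter_cons]

-- characterisation of A's scan loop in terms of pvPieces
theorem pvScanA_char (n : Nat) : ∀ (q current : List Char) (parts : List (List Char)),
    q.length ≤ n →
    pvScanA q (q.map PySem.Chars.upperChar) current parts
      = parts ++ (((pvPieces q).modifyHead (current ++ ·)).map PySem.Chars.strip).filter
          (fun p => p ≠ []) := by
  induction n with
  | zero =>
      intro q current parts hq
      obtain rfl : q = [] := by cases q with | nil => rfl | cons a l => simp at hq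
      exact pvScanA_nil current parts _
  | succ n ih =>
      intro q current parts hq
      cases q with
      | nil => exact pvScanA_nil current parts _
      | cons c cs =>
          by_cases hsep : ((c :: cs).map PySem.Chars.upperChar).take 4 = pvSep
          · have hlen4 : 4 ≤ cs.length + 1 := by
              have := congrArg List.length hsep
              simp [pvSep] at this
              omega
            rw [pvScanA.eq_2, if_pos hsep]
            rw [show List.drop 4 (List.map PySem.Chars.upperChar (c :: cs))
                  = List.map PySem.Chars.upperChar (List.drop 4 (c :: cs)) from
                (List.map_drop ..).symm]
            rw [ih _ [] _ (by simp only [List.length_drop, List.length_cons] at hq ⊢; omega)]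
            have hmod : (pvPieces ((c :: cs).drop 4)).modifyHead (fun x => [] ++ x)
                = pvPieces ((c :: cs).drop 4) := by
              cases hpp : pvPieces ((c :: cs).drop 4) <;> simp
            rw [hmod, pvPieces.eq_2, if_pos hsep]
            by_cases h : PySem.Chars.strip current = [] <;>
              simp [h, List.filter_cons, List.append_assoc]
          · rw [pvScanA.eq_2, if_neg hsep]
            rw [show List.drop 1 (List.map PySem.Chars.upperChar (c :: cs))
                  = List.map PySem.Chars.upperChar cs from by simp]
            rw [ih _ _ _ (by simp only [List.length_cons] at hq; omega)]
            rw [pvPieces.eq_2, if_neg hsep]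
            cases hpp : pvPieces cs with
            | nil => exact absurd hpp (pvPieces_ne_nil cs)
            | cons hd tl => simp [List.append_assoc]

theorem pvScanA_good (q : List Char) :
    pvScanA q (PySem.Chars.upper q) [] [] = pvGood q := by
  have h := pvScanA_char q.length q [] [] le_rfl
  have hmod : (pvPieces q).modifyHead (fun x => [] ++ x) = pvPieces q := by
    cases hpp : pvPieces q <;> simp
  rw [hmod] at h
  simpa [PySem.Chars.upper, pvGood] using h

-- piece arithmetic: total length accounting
theorem pvPieces_sum (q : List Char) :
    ((pvPieces q).map List.length).sum + 4 * ((pvPieces q).length - 1) = q.length := by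
  induction q using pvPieces.induct with
  | case1 => rw [pvPieces.eq_1]; simp
  | case2 c cs h ih =>
      have hlen4 : 4 ≤ cs.length + 1 := by
        have := congrArg List.length h
        simp [pvSep] at this
        omega
      have hl : 1 ≤ (pvPieces ((c :: cs).drop 4)).length :=
        List.length_pos_of_ne_nil (pvPieces_ne_nil _)
      rw [pvPieces.eq_2, if_pos h]
      simp only [List.map_cons, List.sum_cons, List.length_cons, List.length_nil]
      simp only [List.length_drop, List.length_cons] at ih
      omega
  | case3 c cs h ih =>
      rw [pvPieces.eq_2, if_neg h]
      cases hpp : pvPieces cs with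
      | nil => exact absurd hpp (pvPieces_ne_nil cs)
      | cons hd tl =>
          rw [hpp] at ih
          simp at ih ⊢
          omega

-- bound used for well-founded recursion of both ports
theorem pvGood_part_le (q p : List Char) (hp : p ∈ pvGood q)
    (h : 1 < (pvGood q).length) : p.length + 4 ≤ q.length := by
  unfold pvGood at hp h
  obtain ⟨hmem, -⟩ := List.mem_filter.mp hp
  obtain ⟨piece, hpiece, rfl⟩ := List.mem_map.mp hmem
  have h2 : 2 ≤ (pvPieces q).length := by
    have hf := List.length_filter_le (fun p => decide (p ≠ []))
      ((pvPieces q).map PySem.Chars.strip)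
    have hm : ((pvPieces q).map PySem.Chars.strip).length = (pvPieces q).length :=
      List.length_map ..
    omega
  have hple : piece.length ≤ ((pvPieces q).map List.length).sum :=
    List.single_le_sum (fun x _ => Nat.zero_le x) _ (List.mem_map_of_mem hpiece)
  have hsum := pvPieces_sum q
  have hst := pvStrip_length_le piece
  omega

theorem pvPartLtA (q p : List Char)
    (hp : p ∈ pvScanA (PySem.Chars.strip q) (PySem.Chars.upper (PySem.Chars.strip q)) [] [])
    (h : 1 < (pvScanA (PySem.Chars.strip q) (PySem.Chars.upper (PySem.Chars.strip q)) [] []).length) :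
    p.length < q.length := by
  rw [pvScanA_good] at hp h
  have := pvGood_part_le _ p hp h
  have := pvStrip_length_le q
  omega

-- A's parse_boolean_query result dict, as an AST (mutual pair: no nested inductive)
mutual
inductive PyQ : Type
  | term : List Char → PyQ
  | notq : List Char → PyQ
  | orq  : PyQList → PyQ
inductive PyQList : Type
  | nil  : PyQList
  | cons : PyQ → PyQList → PyQList
end

def pvQListOf : List PyQ → PyQList
  | [] => .nil
  | q :: l => .cons q (pvQListOf l)

-- parse_boolean_query
def pvParse (q : List Char) : PyQ :=
  let t := PySem.Chars.strip q
  let u := PySem.Chars.upper t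
  if PySem.Chars.startswith u pvNot4 then
    .notq (PySem.Chars.strip (PySem.List.slice t (some 4) none))
  else if PySem.Chars.isIn pvSep u then
    let parts := pvScanA t u [] []
    if h : 1 < parts.length then
      .orq (pvQListOf (parts.attach.map (fun p => pvParse p.1)))
    else
      .term t
  else
    .term t
  termination_by q.length
  decreasing_by
    exact pvPartLtA q _ p.2 h

-- extract_terms: walks the AST appending to the shared `terms` accumulator
mutual
def pvExtractQ : PyQ → List (List Char) → List (List Char)
  | .term s, terms => terms ++ [s]
  | .orq subs, terms => pvExtractL subs terms
  | .notq s, terms => terms ++ [s]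
def pvExtractL : PyQList → List (List Char) → List (List Char)
  | .nil, terms => terms
  | .cons q rest, terms => pvExtractL rest (pvExtractQ q terms)
end

def get_search_terms (query : String) : List String :=
  (pvExtractQ (pvParse query.toList) []).map String.ofList

-- ===== PORT B =====
-- termination fact for the find-based splitter
theorem pvPartsB_term (u : List Char) (h : ¬ PySem.Chars.find u pvSep = -1) :
    (PySem.List.slice u (some (PySem.Chars.find u pvSep + 4)) none).length < u.length := by
  have hinf : pvSep <:+: u := (PySem.Chars.find_ne_neg_one_iff u pvSep).mp h
  have hlen4 : 4 ≤ u.length := by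
    have := hinf.length_le
    simpa [pvSep] using this
  have hi : -1 ≤ PySem.Chars.find u pvSep := PySem.Chars.neg_one_le_find u pvSep
  rw [PySem.List.slice_from u (by omega : (0:Int) ≤ PySem.Chars.find u pvSep + 4)]
  simp only [List.length_drop]
  omega

-- _or_parts: split query on the first case-insensitive ' OR ' (str.find) and recurse on the rest
def pvPartsB (q u : List Char) : List (List Char) :=
  let i := PySem.Chars.find u pvSep
  if h : i = -1 then
    let head := PySem.Chars.strip q
    if head ≠ [] then [head] else []
  else
    let head := PySem.Chars.strip (PySem.List.slice q none (some i))
    let rest := pvPartsB (PySem.List.slice q (some (i + 4)) none)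
                         (PySem.List.slice u (some (i + 4)) none)
    (if head ≠ [] then [head] else []) ++ rest
  termination_by u.length
  decreasing_by
    exact pvPartsB_term u h

-- pvPieces of an OR-free string
theorem pvPieces_no_sep : ∀ q : List Char, ¬ pvSep <:+: q.map PySem.Chars.upperChar →
    pvPieces q = [q] := by
  intro q
  induction q with
  | nil => intro _; rw [pvPieces.eq_1]
  | cons c cs ih =>
      intro h
      have hsep : ¬ ((c :: cs).map PySem.Chars.upperChar).take 4 = pvSep := by
        intro htake
        exact h (htake ▸ (List.take_prefix 4 _).isInfix)
      rw [pvPieces.eq_2, if_neg hsep]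
      have hcs : ¬ pvSep <:+: cs.map PySem.Chars.upperChar := by
        intro hin
        obtain ⟨s, t, hst⟩ := hin
        exact h ⟨PySem.Chars.upperChar c :: s, t, by simp [hst]⟩
      rw [ih hcs]
      simp

-- pvPieces when the first occurrence of ' OR ' is at index j
theorem pvPieces_first : ∀ (j : Nat) (q : List Char),
    pvSep <+: (q.map PySem.Chars.upperChar).drop j →
    (∀ k, k < j → ¬ pvSep <+: (q.map PySem.Chars.upperChar).drop k) →
    pvPieces q = q.take j :: pvPieces (q.drop (j + 4)) := by
  intro j
  induction j with
  | zero =>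
      intro q h _
      cases q with
      | nil => simp [pvSep] at h
      | cons c cs =>
          have htake : ((c :: cs).map PySem.Chars.upperChar).take 4 = pvSep := by
            have := List.prefix_iff_eq_take.mp (by simpa using h)
            simpa [pvSep] using this.symm
          rw [pvPieces.eq_2, if_pos htake]
          simp
  | succ j ih =>
      intro q h hmin
      cases q with
      | nil => simp [pvSep] at h
      | cons c cs =>
          have hsep : ¬ ((c :: cs).map PySem.Chars.upperChar).take 4 = pvSep := by
            intro htake
            refine hmin 0 (Nat.succ_pos j) ?_
            rw [List.drop_zero, ← htake]
            exact List.take_prefix 4 _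
          rw [pvPieces.eq_2, if_neg hsep]
          have h' : pvSep <+: (cs.map PySem.Chars.upperChar).drop j := by simpa using h
          have hmin' : ∀ k, k < j → ¬ pvSep <+: (cs.map PySem.Chars.upperChar).drop k := by
            intro k hk
            have := hmin (k + 1) (by omega)
            simpa using this
          rw [ih cs h' hmin']
          simp [List.modifyHead_cons, List.take_succ_cons,
            show j + 1 + 4 = (j + 4) + 1 from by omega, List.drop_succ_cons]

theorem pvPartsB_char (n : Nat) : ∀ q : List Char, q.length ≤ n →
    pvPartsB q (q.map PySem.Chars.upperChar) = pvGood q := by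
  induction n using Nat.strong_induction_on with
  | _ n ihn =>
  intro q hq
  rw [pvPartsB.eq_def]
  dsimp only
  by_cases hi : PySem.Chars.find (q.map PySem.Chars.upperChar) pvSep = -1
  · rw [dif_pos hi]
    have hnosep : ¬ pvSep <:+: q.map PySem.Chars.upperChar :=
      (PySem.Chars.find_eq_neg_one_iff _ _).mp hi
    rw [pvGood, pvPieces_no_sep q hnosep]
    by_cases h : PySem.Chars.strip q = [] <;> simp [h, List.filter_cons]
  · rw [dif_neg hi]
    have hi0 : 0 ≤ PySem.Chars.find (q.map PySem.Chars.upperChar) pvSep := by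
      have := PySem.Chars.neg_one_le_find (q.map PySem.Chars.upperChar) pvSep
      omega
    obtain ⟨hpre, hminim⟩ := PySem.Chars.find_spec hi0
    have hpieces := pvPieces_first (PySem.Chars.find (q.map PySem.Chars.upperChar) pvSep).toNat
      q hpre hminim
    have hj4 : 4 + (PySem.Chars.find (q.map PySem.Chars.upperChar) pvSep).toNat ≤ q.length := by
      have hle := hpre.length_le
      have h4 : pvSep.length = 4 := by decide
      simp only [List.length_drop, List.length_map, h4] at hle
      omega
    have hs1 : PySem.List.slice q none (some (PySem.Chars.find (q.map PySem.Chars.upperChar) pvSep))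
        = q.take (PySem.Chars.find (q.map PySem.Chars.upperChar) pvSep).toNat :=
      PySem.List.slice_to q hi0
    have htn : (PySem.Chars.find (q.map PySem.Chars.upperChar) pvSep + 4).toNat
        = (PySem.Chars.find (q.map PySem.Chars.upperChar) pvSep).toNat + 4 := by omega
    have hs2 : PySem.List.slice q (some (PySem.Chars.find (q.map PySem.Chars.upperChar) pvSep + 4)) none
        = q.drop ((PySem.Chars.find (q.map PySem.Chars.upperChar) pvSep).toNat + 4) := by
      rw [PySem.List.slice_from q (by omega : (0:Int) ≤ PySem.Chars.find (q.map PySem.Chars.upperChar) pvSep + 4), htn]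
    have hs3 : PySem.List.slice (q.map PySem.Chars.upperChar)
          (some (PySem.Chars.find (q.map PySem.Chars.upperChar) pvSep + 4)) none
        = (q.drop ((PySem.Chars.find (q.map PySem.Chars.upperChar) pvSep).toNat + 4)).map PySem.Chars.upperChar := by
      rw [PySem.List.slice_from _ (by omega : (0:Int) ≤ PySem.Chars.find (q.map PySem.Chars.upperChar) pvSep + 4), htn,
        List.map_drop]
    rw [hs1, hs2, hs3]
    rw [ihn (q.drop ((PySem.Chars.find (q.map PySem.Chars.upperChar) pvSep).toNat + 4)).length
      (by simp only [List.length_drop]; omega) _ le_rfl]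
    have hGq : pvGood q
        = (if PySem.Chars.strip (q.take (PySem.Chars.find (q.map PySem.Chars.upperChar) pvSep).toNat) ≠ [] then
            [PySem.Chars.strip (q.take (PySem.Chars.find (q.map PySem.Chars.upperChar) pvSep).toNat)] else [])
          ++ pvGood (q.drop ((PySem.Chars.find (q.map PySem.Chars.upperChar) pvSep).toNat + 4)) := by
      rw [pvGood, hpieces]
      by_cases h : PySem.Chars.strip
          (q.take (PySem.Chars.find (q.map PySem.Chars.upperChar) pvSep).toNat) = [] <;>
        simp [h, pvGood, List.filter_cons]
    rw [hGq]

theorem pvPartsB_good (q : List Char) :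
    pvPartsB q (PySem.Chars.upper q) = pvGood q := by
  have h := pvPartsB_char q.length q le_rfl
  simpa [PySem.Chars.upper] using h

theorem pvPartLtB (q p : List Char)
    (hp : p ∈ pvPartsB (PySem.Chars.strip q) (PySem.Chars.upper (PySem.Chars.strip q)))
    (h : 1 < (pvPartsB (PySem.Chars.strip q) (PySem.Chars.upper (PySem.Chars.strip q))).length) :
    p.length < q.length := by
  rw [pvPartsB_good] at hp h
  have := pvGood_part_le _ p hp h
  have := pvStrip_length_le q
  omega

-- get_search_terms, fused: strip, NOT check, split on ' OR ', recurse into parts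
def pvAlt (q : List Char) : List (List Char) :=
  let t := PySem.Chars.strip q
  let u := PySem.Chars.upper t
  if PySem.Chars.startswith u pvNot4 then
    [PySem.Chars.strip (PySem.List.slice t (some 4) none)]
  else
    let parts := pvPartsB t u
    if h : 1 < parts.length then
      parts.attach.flatMap (fun p => pvAlt p.1)
    else
      [t]
  termination_by q.length
  decreasing_by
    exact pvPartLtB q _ p.2 h

def get_search_terms_alt (query : String) : List String :=
  (pvAlt query.toList).map String.ofList

-- ===== PRECONDITION & SPEC =====
def Spec_get_search_terms (query : String) (out : List String) : Prop := out = get_search_terms_alt query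
instance (query : String) (out : List String) : Decidable (Spec_get_search_terms query out) := by unfold Spec_get_search_terms; infer_instance

-- ===== CLAIM (what is proved, stated in full; the proofs are below) =====
def Claim_equal_get_search_terms : Prop := ∀ (query : String), Dom_get_search_terms query → Spec_get_search_terms query (get_search_terms query)

-- ===== LEMMAS AND PROOFS =====

theorem pvExtractQ_term (s : List Char) (terms : List (List Char)) :
    pvExtractQ (.term s) terms = terms ++ [s] := rfl
theorem pvExtractQ_notq (s : List Char) (terms : List (List Char)) :
    pvExtractQ (.notq s) terms = terms ++ [s] := rfl
theorem pvExtractQ_orq (subs : PyQList) (terms : List (List Char)) :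
    pvExtractQ (.orq subs) terms = pvExtractL subs terms := rfl
theorem pvExtractL_nil (terms : List (List Char)) : pvExtractL .nil terms = terms := rfl
theorem pvExtractL_cons (q : PyQ) (rest : PyQList) (terms : List (List Char)) :
    pvExtractL (.cons q rest) terms = pvExtractL rest (pvExtractQ q terms) := rfl

theorem pvExtractQ_acc : ∀ (x : PyQ) (acc : List (List Char)),
    pvExtractQ x acc = acc ++ pvExtractQ x [] := by
  intro x
  refine PyQ.rec (motive_1 := fun x => ∀ acc, pvExtractQ x acc = acc ++ pvExtractQ x [])
    (motive_2 := fun l => ∀ acc, pvExtractL l acc = acc ++ pvExtractL l [])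
    ?_ ?_ ?_ ?_ ?_ x
  · intro s acc; simp [pvExtractQ_term]
  · intro s acc; simp [pvExtractQ_notq]
  · intro subs ih acc; rw [pvExtractQ_orq, pvExtractQ_orq]; exact ih acc
  · intro acc; simp [pvExtractL_nil]
  · intro hq rest ihq ihr acc
    rw [pvExtractL_cons, pvExtractL_cons]
    rw [ihr (pvExtractQ hq acc), ihq acc, ihr (pvExtractQ hq [])]
    simp

theorem pvExtract_ofList : ∀ (l : List PyQ) (acc : List (List Char)),
    pvExtractL (pvQListOf l) acc = acc ++ l.flatMap (fun x => pvExtractQ x []) := by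
  intro l
  induction l with
  | nil => intro acc; simp [pvQListOf, pvExtractL_nil]
  | cons hq l' ih =>
      intro acc
      simp only [pvQListOf, pvExtractL_cons]
      rw [ih (pvExtractQ hq acc), pvExtractQ_acc hq acc]
      simp [List.flatMap_cons]

theorem pvMain (n : Nat) : ∀ q : List Char, q.length ≤ n →
    pvExtractQ (pvParse q) [] = pvAlt q := by
  induction n using Nat.strong_induction_on with
  | _ n ihn =>
  intro q hq
  rw [pvParse.eq_def, pvAlt.eq_def]
  by_cases hnot : PySem.Chars.startswith (PySem.Chars.upper (PySem.Chars.strip q)) pvNot4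
  · rw [if_pos hnot, if_pos hnot, pvExtractQ_notq]
    simp
  · rw [if_neg hnot, if_neg hnot]
    have hA := pvScanA_good (PySem.Chars.strip q)
    have hB := pvPartsB_good (PySem.Chars.strip q)
    rw [hA, hB]
    by_cases hin : PySem.Chars.isIn pvSep (PySem.Chars.upper (PySem.Chars.strip q))
    · rw [if_pos hin]
      by_cases hgt : 1 < (pvGood (PySem.Chars.strip q)).length
      · rw [dif_pos hgt, dif_pos hgt, pvExtractQ_orq, pvExtract_ofList]
        rw [List.nil_append, List.flatMap_map]
        refine List.flatMap_congr ?_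
        intro a _
        have hbound := pvGood_part_le (PySem.Chars.strip q) a.1 a.2 hgt
        have hst := pvStrip_length_le q
        exact ihn a.1.length (by omega) a.1 le_rfl
      · rw [dif_neg hgt, dif_neg hgt, pvExtractQ_term]
        simp
    · rw [if_neg hin]
      have hnosep : ¬ pvSep <:+: (PySem.Chars.strip q).map PySem.Chars.upperChar := by
        have := (PySem.Chars.isIn_eq_false_iff pvSep
          (PySem.Chars.upper (PySem.Chars.strip q))).mp (by simpa using hin)
        simpa [PySem.Chars.upper] using this
      have hlen : ¬ 1 < (pvGood (PySem.Chars.strip q)).length := by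
        rw [pvGood, pvPieces_no_sep _ hnosep]
        by_cases h : PySem.Chars.strip (PySem.Chars.strip q) = [] <;> simp [h, List.filter_cons]
      rw [dif_neg hlen, pvExtractQ_term]
      simp

-- ===== VERDICT (by name: the statement is the Claim_ definition above) =====
theorem get_search_terms_spec : Claim_equal_get_search_terms := by
  intro query _
  unfold Spec_get_search_terms get_search_terms get_search_terms_alt
  rw [pvMain query.toList.length query.toList le_rfl]
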